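-- pv_equiv track=rewrite | github.com/srgee/advent-of-code | 2025/day07/part1.py | solve
-- ===== SOURCE A (Python) =====
-- from collections import deque, namedtuple
--
-- def solve(data: list[str]) -> int:
--     '''Implement BFS algorithm usinf a doble-ended queue and a set for explored cells. Whenever we hit a splitter we increment count and and split the beam.'''
--     Point = namedtuple('Point', 'row col')
--
--     # Parse input data into a list of splitter coordinates (row, col)
--     splitter_coords = []
--     max_row, max_col = len(data), len(data[0])
--     for i in range(max_row):
--         for j in range(max_col):
--             if data[i][j] == '^':
--                 splitter_coords.append(Point(i, j))
--
--     start = Point(0, data[0].find('S'))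
--     splits = 0
--     explored = set()
--     explored.add(start)
--     queue = deque()
--     queue.append(start)
--     while queue:
--         current = queue.popleft()
--         if current in splitter_coords:
--             splits += 1
--
--             # Split
--             for dcol in (-1, 1):
--                 adjacent = Point(current.row, current.col+dcol)
--                 if adjacent.row < max_row and adjacent.col < max_col and adjacent not in explored:
--                     queue.append(adjacent)
--                     explored.add(adjacent)
--         else:
--             # Move down
--             adjacent = Point(current.row+1, current.col)
--             if adjacent.row < max_row and adjacent.col < max_col and adjacent not in explored:
--                 queue.append(adjacent)
--                 explored.add(adjacent)
--
--     return splits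
-- ===== SOURCE B (Python) =====
-- def solve(data: list[str]) -> int:
--     """Column-jump worklist: per column keep the ascending rows of '^';
--     each beam entry jumps straight to the first splitter at-or-below it."""
--     width = len(data[0])
--     cols = {}  # column -> ascending list of splitter rows
--     for i, row in enumerate(data):
--         for j, ch in enumerate(row[:width]):
--             if ch == '^':
--                 cols.setdefault(j, []).append(i)
--     seen = set()  # splitter cells already hit
--     stack = [(0, data[0].find('S'))]
--     while stack:
--         r, c = stack.pop()
--         hit = None
--         for rr in cols.get(c, []):
--             if rr >= r:
--                 hit = rr
--                 break
--         if hit is None or (hit, c) in seen: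
--             continue
--         seen.add((hit, c))
--         stack.append((hit, c - 1))
--         stack.append((hit, c + 1))
--     return len(seen)
-- ===== Notes on version B (the rewrite author's own statement) =====
-- stated objective: faster
-- what changed: A runs a cell-by-cell BFS over every grid cell, testing each dequeued cell against the whole splitter list; B precomputes, per column, the ascending list of splitter rows and runs a worklist of beam entry points that jump directly to the first splitter at-or-below, deduplicating splitters in a visited set, so empty cells are never walked and no per-cell list scan happens.
import Mathlib
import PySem

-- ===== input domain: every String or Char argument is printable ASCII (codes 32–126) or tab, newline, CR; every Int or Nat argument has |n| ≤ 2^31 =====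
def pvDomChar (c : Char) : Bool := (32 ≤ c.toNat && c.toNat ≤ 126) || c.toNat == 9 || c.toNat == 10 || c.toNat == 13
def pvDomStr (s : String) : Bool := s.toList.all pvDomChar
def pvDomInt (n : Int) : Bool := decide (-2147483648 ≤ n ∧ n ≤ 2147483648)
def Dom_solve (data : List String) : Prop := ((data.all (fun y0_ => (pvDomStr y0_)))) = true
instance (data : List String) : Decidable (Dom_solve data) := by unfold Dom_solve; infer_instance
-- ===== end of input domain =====

-- B replaces A's cell-by-cell BFS with a per-column index of splitter rows and a worklist of
-- beam entry points that jump straight to the next splitter at-or-below (objective: faster,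
-- measured; no empty-cell walk and no per-cell splitter-list scan).

-- ===== PORT A =====
-- data[i][j] as A reads it (the defaults are only reached outside Pre_solve, where Python raises)
def solveChar (data : List String) (i j : Int) : Char :=
  PySem.List.pyGetD (PySem.List.pyGetD data i "").toList j ' '

def solveSplitters (data : List String) (maxRow maxCol : Int) : List (Int × Int) :=
  (PySem.List.pyRange 0 maxRow 1).foldl (fun acc i =>
    (PySem.List.pyRange 0 maxCol 1).foldl (fun acc2 j =>
      if solveChar data i j = '^' then acc2 ++ [(i, j)] else acc2) acc) []

def solveLoop (spl : List (Int × Int)) (maxRow maxCol : Int) :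
    Nat → List (Int × Int) → PySem.Set (Int × Int) → Int → Int
  | 0, _, _, splits => splits
  | _ + 1, [], _, splits => splits
  | fuel + 1, current :: queue, explored, splits =>
    if current ∈ spl then
      let qe := [(-1 : Int), 1].foldl (fun (qe : List (Int × Int) × PySem.Set (Int × Int)) dcol =>
        let adjacent := (current.1, current.2 + dcol)
        if adjacent.1 < maxRow ∧ adjacent.2 < maxCol ∧ adjacent ∉ qe.2 then
          (qe.1 ++ [adjacent], PySem.Set.add qe.2 adjacent)
        else qe) (queue, explored)
      solveLoop spl maxRow maxCol fuel qe.1 qe.2 (splits + 1)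
    else
      let adjacent := (current.1 + 1, current.2)
      if adjacent.1 < maxRow ∧ adjacent.2 < maxCol ∧ adjacent ∉ explored then
        solveLoop spl maxRow maxCol fuel (queue ++ [adjacent])
          (PySem.Set.add explored adjacent) splits
      else solveLoop spl maxRow maxCol fuel queue explored splits

def solve (data : List String) : Int :=
  let maxRow : Int := data.length
  let maxCol : Int := (PySem.List.pyGetD data 0 "").toList.length
  let spl := solveSplitters data maxRow maxCol
  let start : Int × Int := (0, PySem.Str.find (PySem.List.pyGetD data 0 "") "S")
  solveLoop spl maxRow maxCol (2 * (maxRow.toNat * (maxCol.toNat + 1)) + 2)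
    [start] (PySem.Set.add PySem.Set.empty start) 0

-- ===== PORT B =====
-- the per-column splitter index and the worklist loop (list head = top of the Python stack)
def solveAltCols (data : List String) (width : Int) : PySem.Dict Int (List Int) :=
  (PySem.List.enumerate data 0).foldl (fun cols iRow =>
    (PySem.List.enumerate (PySem.List.slice iRow.2.toList none (some width)) 0).foldl
      (fun cols2 jch =>
        if jch.2 = '^' then cols2.modify jch.1 [] (fun l => l ++ [iRow.1]) else cols2)
      cols)
    PySem.Dict.empty

def solveAltLoop (cols : PySem.Dict Int (List Int)) :
    Nat → List (Int × Int) → PySem.Set (Int × Int) → Int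
  | 0, _, seen => (seen.length : Int)
  | _ + 1, [], seen => (seen.length : Int)
  | fuel + 1, rc :: stack, seen =>
    match (cols.getD rc.2 []).find? (fun rr => decide (rc.1 ≤ rr)) with
    | none => solveAltLoop cols fuel stack seen
    | some rr =>
      if (rr, rc.2) ∈ seen then solveAltLoop cols fuel stack seen
      else solveAltLoop cols fuel ((rr, rc.2 + 1) :: (rr, rc.2 - 1) :: stack)
        (PySem.Set.add seen (rr, rc.2))

def solve_alt (data : List String) : Int :=
  let width : Int := (PySem.List.pyGetD data 0 "").toList.length
  let cols := solveAltCols data width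
  let start : Int × Int := (0, PySem.Str.find (PySem.List.pyGetD data 0 "") "S")
  solveAltLoop cols (2 * (data.length * width.toNat) + 2) [start] PySem.Set.empty

-- ===== PRECONDITION & SPEC =====
-- Pre_ excludes exactly the inputs on which A raises IndexError: empty input (len(data[0]))
-- and inputs with a row shorter than row 0 (data[i][j] during parsing).
def Pre_solve (data : List String) : Prop :=
  data ≠ [] ∧ ∀ s ∈ data, (data.headD "").toList.length ≤ s.toList.length
instance (data : List String) : Decidable (Pre_solve data) := by unfold Pre_solve; infer_instance

def pvWitness_solve : List String := ["S.^", ".^.", "^..."]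

def Spec_solve (data : List String) (out : Int) : Prop := out = solve_alt data
instance (data : List String) (out : Int) : Decidable (Spec_solve data out) := by unfold Spec_solve; infer_instance

-- ===== CLAIM (what is proved, stated in full; the proofs are below) =====
def Claim_equal_solve : Prop := ∀ (data : List String), Dom_solve data → Pre_solve data → Spec_solve data (solve data)
-- ===== LEMMAS AND PROOFS =====
def gH (data : List String) : Int := data.length

def gW (data : List String) : Int := ((PySem.List.pyGetD data 0 "").toList.length : Int)

def gS (data : List String) : Int := PySem.Str.find (PySem.List.pyGetD data 0 "") "S"

abbrev isSpl (data : List String) (p : Int × Int) : Prop :=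
  0 ≤ p.1 ∧ p.1 < gH data ∧ 0 ≤ p.2 ∧ p.2 < gW data ∧ solveChar data p.1 p.2 = '^'

theorem spl_eq (data : List String) :
    solveSplitters data (gH data) (gW data) =
      (PySem.List.pyRange 0 (gH data) 1).flatMap (fun i =>
        ((PySem.List.pyRange 0 (gW data) 1).filter
          (fun j => decide (solveChar data i j = '^'))).map (fun j => (i, j))) := by
  unfold solveSplitters
  rw [PySem.List.foldl_congr_mem
    (g := fun acc i => acc ++ ((PySem.List.pyRange 0 (gW data) 1).filter
      (fun j => decide (solveChar data i j = '^'))).map (fun j => (i, j)))]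
  · rw [PySem.List.foldl_append_eq_flatMap]; rfl
  · intro acc i _
    exact PySem.List.foldl_append_ite (p := fun j => solveChar data i j = '^') (f := fun j => (i, j)) (l := PySem.List.pyRange 0 (gW data) 1) (acc := acc)

theorem mem_spl (data : List String) (p : Int × Int) :
    p ∈ solveSplitters data (gH data) (gW data) ↔ isSpl data p := by
  rw [spl_eq]
  simp only [List.mem_flatMap, List.mem_map, List.mem_filter,
    PySem.List.mem_pyRange_one, decide_eq_true_eq]
  unfold isSpl
  constructor
  · rintro ⟨i, ⟨hi0, hiH⟩, j, ⟨⟨hj0, hjW⟩, hc⟩, rfl⟩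
    exact ⟨hi0, hiH, hj0, hjW, hc⟩
  · rintro ⟨h1, h2, h3, h4, h5⟩
    exact ⟨p.1, ⟨h1, h2⟩, p.2, ⟨⟨h3, h4⟩, h5⟩, rfl⟩

theorem length_spl_le (data : List String) :
    (solveSplitters data (gH data) (gW data)).length ≤ (gH data).toNat * (gW data).toNat := by
  rw [spl_eq, List.length_flatMap]
  calc ((PySem.List.pyRange 0 (gH data) 1).map _).sum
      ≤ ((PySem.List.pyRange 0 (gH data) 1).map (fun _ => (gW data).toNat)).sum := by
        apply List.sum_le_sum
        intro i _
        rw [List.length_map]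
        calc (List.filter _ (PySem.List.pyRange 0 (gW data) 1)).length
            ≤ (PySem.List.pyRange 0 (gW data) 1).length := List.length_filter_le ..
          _ = ((gW data) - 0).toNat := PySem.List.length_pyRange_one _ _
          _ = (gW data).toNat := by omega
    _ = (PySem.List.pyRange 0 (gH data) 1).length * (gW data).toNat := by
        rw [List.map_const', List.sum_replicate, smul_eq_mul]
    _ = (gH data).toNat * (gW data).toNat := by
        rw [PySem.List.length_pyRange_one]; norm_num

def colRows (data : List String) (c : Int) : List Int :=
  (PySem.List.pyRange 0 (gH data) 1).filter (fun i => decide (isSpl data (i, c)))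

def NS (data : List String) (r c : Int) : Option Int :=
  (colRows data c).find? (fun rr => decide (r ≤ rr))

theorem mem_colRows (data : List String) (c i : Int) :
    i ∈ colRows data c ↔ isSpl data (i, c) := by
  unfold colRows
  simp only [List.mem_filter, PySem.List.mem_pyRange_one, decide_eq_true_eq]
  constructor
  · exact fun h => h.2
  · intro h
    exact ⟨⟨h.1, h.2.1⟩, h⟩

theorem pairwise_colRows (data : List String) (c : Int) :
    (colRows data c).Pairwise (· < ·) :=
  (List.Pairwise.sublist (List.filter_sublist) (PySem.List.pairwise_lt_pyRange_one _ _))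

theorem NS_some (data : List String) {r c rr : Int} (h : NS data r c = some rr) :
    isSpl data (rr, c) ∧ r ≤ rr ∧ ∀ i, r ≤ i → i < rr → ¬ isSpl data (i, c) := by
  unfold NS at h
  have hmem := List.mem_of_find?_eq_some h
  have hp : r ≤ rr := by simpa using List.find?_some h
  refine ⟨(mem_colRows data c rr).1 hmem, hp, ?_⟩
  intro i hri hirr hspl
  rw [List.find?_eq_some_iff_append] at h
  obtain ⟨-, as, bs, heq, hfail⟩ := h
  have hi : i ∈ colRows data c := (mem_colRows data c i).2 hspl
  rw [heq] at hi
  rcases List.mem_append.1 hi with hias | hibs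
  · have := hfail i hias
    simp at this
    omega
  · rcases List.mem_cons.1 hibs with rfl | hibs'
    · omega
    · have hpw := pairwise_colRows data c
      rw [heq] at hpw
      have := (List.pairwise_cons.1 (List.pairwise_append.1 hpw).2.1).1 i hibs'
      omega

theorem NS_none (data : List String) {r c : Int} (h : NS data r c = none) :
    ∀ i, r ≤ i → ¬ isSpl data (i, c) := by
  intro i hri hspl
  unfold NS at h
  rw [List.find?_eq_none] at h
  have := h i ((mem_colRows data c i).2 hspl)
  simp at this
  omega

theorem NS_unique (data : List String) {r c rr : Int} (h : isSpl data (rr, c))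
    (hle : r ≤ rr) (hmin : ∀ i, r ≤ i → i < rr → ¬ isSpl data (i, c)) :
    NS data r c = some rr := by
  cases hns : NS data r c with
  | none => exact absurd h (NS_none data hns rr hle)
  | some rr' =>
    obtain ⟨h1, h2, h3⟩ := NS_some data hns
    by_cases hlt : rr' < rr
    · exact absurd h1 (hmin rr' h2 hlt)
    · by_cases hgt : rr < rr'
      · exact absurd h (h3 rr hle hgt)
      · congr 1; omega

theorem NS_spl (data : List String) {r c : Int} (h : isSpl data (r, c)) :
    NS data r c = some r :=
  NS_unique data h le_rfl (fun i h1 h2 _ => by omega)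

theorem NS_skip (data : List String) {r c : Int} (h : ¬ isSpl data (r, c)) :
    NS data r c = NS data (r + 1) c := by
  cases hns : NS data (r + 1) c with
  | none =>
    cases hns' : NS data r c with
    | none => rfl
    | some rr =>
      obtain ⟨h1, h2, _⟩ := NS_some data hns'
      have hne : rr ≠ r := fun he => h (he ▸ h1)
      exact absurd h1 (NS_none data hns rr (by omega))
  | some rr =>
    obtain ⟨h1, h2, h3⟩ := NS_some data hns
    refine NS_unique data h1 (by omega) ?_
    intro i hri hirr
    by_cases hir : i = r
    · exact hir ▸ h
    · exact h3 i (by omega) hirr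

inductive RC (data : List String) : Int × Int → Prop
  | start : RC data (0, gS data)
  | down {r c : Int} : RC data (r, c) → ¬ isSpl data (r, c) → r + 1 < gH data →
      c < gW data → RC data (r + 1, c)
  | side {r c d : Int} : RC data (r, c) → isSpl data (r, c) → (d = -1 ∨ d = 1) →
      c + d < gW data → RC data (r, c + d)

inductive RS (data : List String) : Int × Int → Prop
  | start {rr : Int} : NS data 0 (gS data) = some rr → RS data (rr, gS data)
  | step {r c d rr : Int} : RS data (r, c) → (d = -1 ∨ d = 1) →
      NS data r (c + d) = some rr → RS data (rr, c + d)

theorem descend (data : List String) {r c rr : Int} (h : RC data (r, c))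
    (hn : NS data r c = some rr) : RC data (rr, c) := by
  obtain ⟨hspl, hle, hmin⟩ := NS_some data hn
  induction hd : (rr - r).toNat generalizing r with
  | zero =>
    have : rr = r := by omega
    exact this ▸ h
  | succ n ih =>
    have hlt : r < rr := by omega
    have hns : ¬ isSpl data (r, c) := hmin r le_rfl hlt
    have hRC : RC data (r + 1, c) :=
      RC.down h hns (by have := hspl.2.1; simp [isSpl] at hspl ⊢; omega) hspl.2.2.2.1
    exact ih hRC ((NS_skip data hns).symm ▸ hn) (by omega)
      (fun i h1 h2 => hmin i (by omega) h2) (by omega)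

theorem RS_sub (data : List String) {p : Int × Int} (h : RS data p) :
    RC data p ∧ isSpl data p := by
  induction h with
  | start hns => exact ⟨descend data RC.start hns, (NS_some data hns).1⟩
  | step hrs hd hns ih =>
    obtain ⟨hrc, hspl⟩ := ih
    obtain ⟨hspl', -, -⟩ := NS_some data hns
    have hside := RC.side hrc hspl hd hspl'.2.2.2.1
    exact ⟨descend data hside hns, hspl'⟩

theorem RC_NS (data : List String) {p : Int × Int} (h : RC data p) :
    ∀ rr, NS data p.1 p.2 = some rr → RS data (rr, p.2) := by
  induction h with
  | start => exact fun rr hns => RS.start hns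
  | down hrc hns _ _ ih =>
    intro rr h
    exact ih rr ((NS_skip data hns) ▸ h)
  | side hrc hspl hd _ ih =>
    intro rr h
    exact RS.step (ih _ (NS_spl data hspl)) hd h

theorem bridge (data : List String) (p : Int × Int) :
    (RC data p ∧ isSpl data p) ↔ RS data p := by
  constructor
  · rintro ⟨hrc, hspl⟩
    obtain ⟨r, c⟩ := p
    exact RC_NS data hrc r (NS_spl data hspl)
  · exact RS_sub data

theorem inner_fold_getD (i : Int) (lst : List Char) (s : Int)
    (d : PySem.Dict Int (List Int)) (c : Int) :
    ((PySem.List.enumerate lst s).foldl (fun d2 jch =>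
        if jch.2 = '^' then d2.modify jch.1 [] (fun l => l ++ [i]) else d2) d).getD c []
    = d.getD c [] ++
      ((PySem.List.enumerate lst s).filter (fun jch => jch.1 == c && jch.2 == '^')).map
        (fun _ => i) := by
  induction lst generalizing s d with
  | nil => simp [PySem.List.enumerate_nil]
  | cons x xs ih =>
    rw [PySem.List.enumerate_cons]
    simp only [List.foldl_cons, List.filter_cons]
    by_cases hx : x = '^'
    · by_cases hc : s = c
      · subst hc hx
        simp only [beq_self_eq_true, Bool.and_self, if_pos]
        rw [ih, PySem.Dict.getD_modify_self]
        simp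
      · rw [if_pos hx, ih]
        have : ((s, x).1 == c && (x == '^')) = false := by
          simp [hc]
        rw [this]
        simp only [Bool.false_eq_true, if_false]
        rw [PySem.Dict.getD_modify, if_neg (fun h => hc h.symm)]
    · rw [if_neg hx, ih]
      have : ((s, x).1 == c && (x == '^')) = false := by
        simp [hx]
      rw [this]
      simp

theorem outer_fold_getD (data : List String) (W : Int) (rows : List String) (s : Int)
    (d : PySem.Dict Int (List Int)) (c : Int) :
    ((PySem.List.enumerate rows s).foldl (fun cols iRow =>
        (PySem.List.enumerate (PySem.List.slice iRow.2.toList none (some W)) 0).foldl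
          (fun cols2 jch =>
            if jch.2 = '^' then cols2.modify jch.1 [] (fun l => l ++ [iRow.1]) else cols2)
          cols) d).getD c []
    = d.getD c [] ++ (PySem.List.enumerate rows s).flatMap (fun iRow =>
        ((PySem.List.enumerate (PySem.List.slice iRow.2.toList none (some W)) 0).filter
          (fun jch => jch.1 == c && jch.2 == '^')).map (fun _ => iRow.1)) := by
  induction rows generalizing s d with
  | nil => simp [PySem.List.enumerate_nil]
  | cons row rows ih =>
    rw [PySem.List.enumerate_cons]
    simp only [List.foldl_cons, List.flatMap_cons]
    rw [ih, inner_fold_getD]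
    simp [List.append_assoc]

theorem filter_enumerate_single (lst : List Char) (s c : Int) :
    (PySem.List.enumerate lst s).filter (fun jch => jch.1 == c && jch.2 == '^')
    = if 0 ≤ c - s ∧ (c - s) < lst.length ∧ lst[(c - s).toNat]? = some '^'
      then [(c, '^')] else [] := by
  induction lst generalizing s with
  | nil => simp [PySem.List.enumerate_nil]
  | cons x xs ih =>
    rw [PySem.List.enumerate_cons]
    rw [List.filter_cons, ih (s + 1)]
    by_cases hc : s = c
    · subst hc
      by_cases hx : x = '^'
      · subst hx
        simp only [beq_self_eq_true, Bool.and_self, if_pos]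
        have h1 : (0 ≤ s - s ∧ s - s < (('^' :: xs) : List Char).length ∧
            (('^' :: xs) : List Char)[(s - s).toNat]? = some '^') := by
          simp
        rw [if_pos h1]
        have h2 : ¬ (0 ≤ s - (s + 1) ∧ s - (s + 1) < (xs : List Char).length ∧
            xs[(s - (s + 1)).toNat]? = some '^') := by omega
        rw [if_neg h2]
      · have hb : ((s, x).1 == s && (x == '^')) = false := by simp [hx]
        rw [hb]
        simp only [Bool.false_eq_true, if_false]
        have h2 : ¬ (0 ≤ s - (s + 1) ∧ s - (s + 1) < (xs : List Char).length ∧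
            xs[(s - (s + 1)).toNat]? = some '^') := by omega
        rw [if_neg h2]
        have h3 : ¬ (0 ≤ s - s ∧ s - s < ((x :: xs) : List Char).length ∧
            ((x :: xs) : List Char)[(s - s).toNat]? = some '^') := by
          intro ⟨_, _, h⟩
          simp at h
          exact hx h
        rw [if_neg h3]
    · have hb : ((s, x).1 == c && (x == '^')) = false := by
        simp only [Bool.and_eq_false_iff]
        left
        simpa using hc
      rw [hb]
      simp only [Bool.false_eq_true, if_false]
      have hiff : (0 ≤ c - (s + 1) ∧ c - (s + 1) < (xs : List Char).length ∧
          xs[(c - (s + 1)).toNat]? = some '^')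
          ↔ (0 ≤ c - s ∧ c - s < ((x :: xs) : List Char).length ∧
            ((x :: xs) : List Char)[(c - s).toNat]? = some '^') := by
        constructor
        · rintro ⟨h1, h2, h3⟩
          refine ⟨by omega, by simp; omega, ?_⟩
          have hh : (c - s).toNat = (c - (s + 1)).toNat + 1 := by omega
          rw [hh]
          simpa using h3
        · rintro ⟨h1, h2, h3⟩
          have hcs : c - s ≠ 0 := by omega
          have hh : (c - s).toNat = (c - (s + 1)).toNat + 1 := by omega
          rw [hh] at h3
          simp at h3 h2
          refine ⟨by omega, by omega, by simpa using h3⟩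
      rw [if_congr hiff rfl rfl]

theorem flatMap_ite_singleton {α : Type} (l : List α) (P : α → Prop) [DecidablePred P] :
    l.flatMap (fun i => if P i then [i] else []) = l.filter (fun i => decide (P i)) := by
  induction l with
  | nil => rfl
  | cons x xs ih =>
    rw [List.flatMap_cons, List.filter_cons, ih]
    by_cases h : P x
    · simp [h]
    · simp [h]

theorem cols_getD (data : List String) (c : Int) :
    (solveAltCols data (gW data)).getD c [] = colRows data c := by
  unfold solveAltCols
  rw [outer_fold_getD data (gW data) data 0 PySem.Dict.empty c]
  rw [PySem.Dict.getD_empty, List.nil_append]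
  rw [PySem.List.enumerate_eq_map_pyRange (d := "")]
  rw [List.flatMap_map]
  have hW : (0 : Int) ≤ gW data := by unfold gW; positivity
  have hstep : ∀ i : Int, i ∈ PySem.List.pyRange 0 (gH data) 1 →
      (((PySem.List.enumerate
          (PySem.List.slice (PySem.List.pyGetD data i "").toList none (some (gW data))) 0).filter
        (fun jch => jch.1 == c && jch.2 == '^')).map (fun _ => i))
      = if isSpl data (i, c) then [i] else [] := by
    intro i hi
    rw [PySem.List.mem_pyRange_one] at hi
    rw [filter_enumerate_single]
    set row : List Char := (PySem.List.pyGetD data i "").toList with hrow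
    set lst : List Char := PySem.List.slice row none (some (gW data)) with hlst
    have hlst' : lst = row.take (gW data).toNat := by
      rw [hlst, PySem.List.slice_to _ hW]
    have hgetD : (0:Int) ≤ c → solveChar data i c = (row[c.toNat]?).getD ' ' := by
      intro h3
      unfold solveChar
      rw [← hrow]
      simp only [PySem.List.pyGetD]
      rw [PySem.List.pyGet?_of_nonneg _ h3]
    have hcond : (0 ≤ c - 0 ∧ c - 0 < (lst.length : Int) ∧ lst[(c - 0).toNat]? = some '^')
        ↔ isSpl data (i, c) := by
      unfold isSpl
      constructor
      · rintro ⟨h1, h2, h3⟩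
        rw [hlst', List.getElem?_take] at h3
        rw [hlst', List.length_take] at h2
        split at h3
        · refine ⟨hi.1, hi.2, by omega, by push_cast at h2; omega, ?_⟩
          rw [hgetD (by omega)]
          have h3' : row[c.toNat]? = some '^' := by simpa using h3
          rw [h3']
          rfl
        · exact absurd h3 (by simp)
      · rintro ⟨-, -, h3, h4, h5⟩
        rw [hgetD h3] at h5
        have hsome : row[c.toNat]? = some '^' := by
          cases hg : row[c.toNat]? with
          | none => rw [hg] at h5; simp at h5
          | some ch => rw [hg] at h5; simp at h5; rw [h5]
        have hclen : c.toNat < row.length := (List.getElem?_eq_some_iff.1 hsome).1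
        have hlen : lst.length = min (gW data).toNat row.length := by
          rw [hlst', List.length_take]
        refine ⟨by omega, by rw [hlen]; push_cast; omega, ?_⟩
        rw [hlst', List.getElem?_take, if_pos (by omega)]
        simpa using hsome
    by_cases h : isSpl data (i, c)
    · rw [if_pos h, if_pos (hcond.2 h)]
      simp
    · rw [if_neg h, if_neg (fun hc' => h (hcond.1 hc'))]
      simp
  refine Eq.trans (List.flatMap_congr (g := fun i => if isSpl data (i, c) then [i] else []) ?_) ?_
  · intro i hi
    have hgoal := hstep i (by simpa [gH, PySem.List.len_eq] using hi)
    simpa using hgoal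
  · rw [flatMap_ite_singleton]
    unfold colRows gH
    simp [PySem.List.len_eq]

def EntryDone (data : List String) (seen : List (Int × Int)) (e : Int × Int) : Prop :=
  ∀ rr, NS data e.1 e.2 = some rr → (rr, e.2) ∈ seen

theorem B_loop (data : List String) :
    ∀ (fuel : Nat) (stack seen : List (Int × Int)),
    seen.Nodup →
    (∀ x ∈ seen, RS data x) →
    (∀ x ∈ stack, ∀ rr, NS data x.1 x.2 = some rr → RS data (rr, x.2)) →
    (EntryDone data seen (0, gS data) ∨ (0, gS data) ∈ stack) →
    (∀ s ∈ seen, ∀ d : Int, (d = -1 ∨ d = 1) →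
        EntryDone data seen (s.1, s.2 + d) ∨ (s.1, s.2 + d) ∈ stack) →
    stack.length + 2 * ((solveSplitters data (gH data) (gW data)).length - seen.length) < fuel →
    ∃ V : List (Int × Int), V.Nodup ∧ (∀ p, p ∈ V ↔ RS data p) ∧
      solveAltLoop (solveAltCols data (gW data)) fuel stack seen = (V.length : Int) := by
  intro fuel
  induction fuel with
  | zero => intro stack seen _ _ _ _ _ hm; omega
  | succ fuel ih =>
    intro stack seen hnd hseen hok hstart hobl hm
    match stack with
    | [] =>
      refine ⟨seen, hnd, ?_, rfl⟩
      intro p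
      constructor
      · exact hseen p
      · intro hp
        induction hp with
        | start hns =>
          rcases hstart with hdone | hmem
          · exact hdone _ hns
          · simp at hmem
        | @step r c d rr hrs hd hns ihp =>
          rcases hobl (r, c) ihp d hd with hdone | hmem
          · exact hdone _ hns
          · simp at hmem
    | rc :: stack' =>
      have hcols : ((solveAltCols data (gW data)).getD rc.2 []).find?
          (fun rr => decide (rc.1 ≤ rr)) = NS data rc.1 rc.2 := by
        rw [cols_getD]; rfl
      simp only [solveAltLoop, hcols]
      cases hns : NS data rc.1 rc.2 with
      | none =>
        have hdone_rc : ∀ seen' : List (Int × Int), EntryDone data seen' rc := by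
          intro seen' rr hns'
          rw [hns] at hns'
          cases hns'
        apply ih stack' seen hnd hseen (fun x hx => hok x (List.mem_cons_of_mem _ hx))
        · rcases hstart with hdone | hmem
          · exact Or.inl hdone
          · rcases List.mem_cons.1 hmem with rfl | hmem'
            · exact Or.inl (hdone_rc seen)
            · exact Or.inr hmem'
        · intro s hs d hd
          rcases hobl s hs d hd with hdone | hmem
          · exact Or.inl hdone
          · rcases List.mem_cons.1 hmem with heq | hmem'
            · exact Or.inl (heq ▸ hdone_rc seen)
            · exact Or.inr hmem'
        · simp only [List.length_cons] at hm
          omega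
      | some rr =>
        dsimp only
        have hdone_rc : ∀ seen' : List (Int × Int), (rr, rc.2) ∈ seen' →
            EntryDone data seen' rc := by
          intro seen' hmm rr' hns'
          rw [hns] at hns'
          cases hns'
          exact hmm
        by_cases hmem : (rr, rc.2) ∈ seen
        · rw [if_pos hmem]
          apply ih stack' seen hnd hseen (fun x hx => hok x (List.mem_cons_of_mem _ hx))
          · rcases hstart with hdone | hmm
            · exact Or.inl hdone
            · rcases List.mem_cons.1 hmm with rfl | hmem'
              · exact Or.inl (hdone_rc seen hmem)
              · exact Or.inr hmem'
          · intro s hs d hd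
            rcases hobl s hs d hd with hdone | hmm
            · exact Or.inl hdone
            · rcases List.mem_cons.1 hmm with heq | hmem'
              · exact Or.inl (heq ▸ hdone_rc seen hmem)
              · exact Or.inr hmem'
          · simp only [List.length_cons] at hm
            omega
        · rw [if_neg hmem, PySem.Set.add_of_not_mem hmem]
          have hRSnew : RS data (rr, rc.2) := hok rc List.mem_cons_self rr hns
          have hmono : ∀ e, EntryDone data seen e → EntryDone data (seen ++ [(rr, rc.2)]) e :=
            fun e hd rr' h' => List.mem_append_left _ (hd rr' h')
          have hnewmem : (rr, rc.2) ∈ seen ++ [(rr, rc.2)] := by simp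
          apply ih ((rr, rc.2 + 1) :: (rr, rc.2 - 1) :: stack') (seen ++ [(rr, rc.2)])
          · refine List.Nodup.append hnd (by simp) ?_
            intro x hx hx'
            simp at hx'
            subst hx'
            exact hmem hx
          · intro x hx
            rcases List.mem_append.1 hx with hx' | hx'
            · exact hseen x hx'
            · simp at hx'
              exact hx' ▸ hRSnew
          · intro x hx rr2 hns2
            rcases List.mem_cons.1 hx with rfl | hx'
            · exact RS.step hRSnew (Or.inr rfl) hns2
            · rcases List.mem_cons.1 hx' with rfl | hx''
              · have : rc.2 - 1 = rc.2 + (-1) := by ring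
                rw [this] at hns2 ⊢
                exact RS.step hRSnew (Or.inl rfl) hns2
              · exact hok x (List.mem_cons_of_mem _ hx'') rr2 hns2
          · rcases hstart with hdone | hmm
            · exact Or.inl (hmono _ hdone)
            · rcases List.mem_cons.1 hmm with rfl | hmem'
              · exact Or.inl (hdone_rc _ hnewmem)
              · exact Or.inr (by simp [hmem'])
          · intro s hs d hd
            rcases List.mem_append.1 hs with hs' | hs'
            · rcases hobl s hs' d hd with hdone | hmm
              · exact Or.inl (hmono _ hdone)
              · rcases List.mem_cons.1 hmm with heq | hmem'
                · exact Or.inl (heq ▸ hdone_rc _ hnewmem)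
                · exact Or.inr (by simp [hmem'])
            · simp at hs'
              subst hs'
              rcases hd with rfl | rfl
              · refine Or.inr ?_
                simp only [List.mem_cons]
                right; left
                rw [Prod.mk.injEq]
                exact ⟨rfl, by ring⟩
              · refine Or.inr ?_
                simp
          · have hsub : (seen ++ [(rr, rc.2)]).length ≤
                (solveSplitters data (gH data) (gW data)).length := by
              apply List.Subperm.length_le
              apply List.Nodup.subperm
              · refine List.Nodup.append hnd (by simp) ?_
                intro x hx hx'
                simp at hx'
                subst hx'
                exact hmem hx
              · intro x hx
                apply (mem_spl data x).2
                rcases List.mem_append.1 hx with hx' | hx'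
                · exact (RS_sub data (hseen x hx')).2
                · simp at hx'
                  exact hx' ▸ (RS_sub data hRSnew).2
            simp only [List.length_cons, List.length_append] at hsub hm ⊢
            omega

theorem B_run (data : List String) :
    ∃ V : List (Int × Int), V.Nodup ∧ (∀ p, p ∈ V ↔ RS data p) ∧
      solve_alt data = (V.length : Int) := by
  have hfuel : 1 + 2 * ((solveSplitters data (gH data) (gW data)).length - ([] : List (Int × Int)).length)
      < 2 * (data.length * ((PySem.List.pyGetD data 0 "").toList.length : Int).toNat) + 2 := by
    have h1 := length_spl_le data
    have h2 : (gH data).toNat = data.length := by simp [gH]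
    have h3 : (gW data).toNat = ((PySem.List.pyGetD data 0 "").toList.length : Int).toNat := rfl
    have h4 : (gH data).toNat * (gW data).toNat
        = data.length * ((PySem.List.pyGetD data 0 "").toList.length : Int).toNat := by
      rw [h2, h3]
    simp only [List.length_nil]
    omega
  obtain ⟨V, h1, h2, h3⟩ := B_loop data
    (2 * (data.length * ((PySem.List.pyGetD data 0 "").toList.length : Int).toNat) + 2)
    [(0, gS data)] []
    (by simp)
    (by simp)
    (by
      intro x hx rr hns
      simp at hx
      subst hx
      exact RS.start hns)
    (Or.inr (by simp))
    (by simp)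
    (by simpa using hfuel)
  exact ⟨V, h1, h2, h3⟩

def inB (data : List String) (p : Int × Int) : Prop :=
  0 ≤ p.1 ∧ p.1 < gH data ∧ -1 ≤ p.2 ∧ p.2 < gW data

def cellList (data : List String) : List (Int × Int) :=
  (PySem.List.pyRange 0 (gH data) 1).flatMap (fun i =>
    (PySem.List.pyRange (-1) (gW data) 1).map (fun j => (i, j)))

theorem mem_cellList (data : List String) (p : Int × Int) :
    p ∈ cellList data ↔ inB data p := by
  unfold cellList inB
  simp only [List.mem_flatMap, List.mem_map, PySem.List.mem_pyRange_one]
  constructor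
  · rintro ⟨i, ⟨h1, h2⟩, j, ⟨h3, h4⟩, rfl⟩
    exact ⟨h1, h2, h3, h4⟩
  · rintro ⟨h1, h2, h3, h4⟩
    exact ⟨p.1, ⟨h1, h2⟩, p.2, ⟨h3, h4⟩, rfl⟩

def SuccsIn (data : List String) (x : Int × Int) (e : List (Int × Int)) : Prop :=
  (isSpl data x → ∀ d : Int, (d = -1 ∨ d = 1) → x.2 + d < gW data → (x.1, x.2 + d) ∈ e)
  ∧ (¬ isSpl data x → x.1 + 1 < gH data → x.2 < gW data → (x.1 + 1, x.2) ∈ e)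

theorem SuccsIn_mono (data : List String) {x : Int × Int} {e e' : List (Int × Int)}
    (hsub : ∀ y ∈ e, y ∈ e') (h : SuccsIn data x e) : SuccsIn data x e' :=
  ⟨fun hs d hd hw => hsub _ (h.1 hs d hd hw), fun hs hh hw => hsub _ (h.2 hs hh hw)⟩

theorem A_loop (data : List String) :
    ∀ (fuel : Nat) (q done e : List (Int × Int)) (s : Int),
    e = done ++ q →
    s = (done.countP (fun p => decide (isSpl data p)) : Int) →
    e.Nodup →
    (∀ x ∈ e, RC data x ∧ inB data x) →
    (∀ x ∈ done, SuccsIn data x e) →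
    (0, gS data) ∈ e →
    q.length + 2 * ((cellList data).length - e.length) < fuel →
    ∃ E : List (Int × Int), E.Nodup ∧ (∀ x ∈ E, RC data x ∧ inB data x) ∧
      (∀ x ∈ E, SuccsIn data x E) ∧ (0, gS data) ∈ E ∧
      solveLoop (solveSplitters data (gH data) (gW data)) (gH data) (gW data) fuel q e s
      = (E.countP (fun p => decide (isSpl data p)) : Int) := by
  intro fuel
  induction fuel with
  | zero => intro q done e s _ _ _ _ _ _ hm; omega
  | succ fuel ih =>
    intro q done e s he hs hnd hall hdone hstart hm
    match q with
    | [] =>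
      rw [List.append_nil] at he
      subst hs
      rw [he] at hnd hall hdone hstart ⊢
      exact ⟨done, hnd, hall, hdone, hstart, by simp [solveLoop]⟩
    | cur :: rest =>
      obtain ⟨hcurRC, hcurB⟩ := hall cur (by simp [he])
      obtain ⟨hb1, hb2, hb3, hb4⟩ := hcurB
      have hsubE : ∀ x ∈ e, x ∈ cellList data :=
        fun x hx => (mem_cellList data x).2 (hall x hx).2
      have hcap : e.length ≤ (cellList data).length :=
        ((hnd.subperm hsubE)).length_le
      have key : ∀ (new : List (Int × Int)) (s' : Int),
          s' = ((done ++ [cur]).countP (fun p => decide (isSpl data p)) : Int) →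
          new.Nodup → (∀ x ∈ new, x ∉ e) →
          (∀ x ∈ new, RC data x ∧ inB data x) →
          SuccsIn data cur (e ++ new) →
          new.length ≤ 2 →
          ∃ E : List (Int × Int), E.Nodup ∧ (∀ x ∈ E, RC data x ∧ inB data x) ∧
            (∀ x ∈ E, SuccsIn data x E) ∧ (0, gS data) ∈ E ∧
            solveLoop (solveSplitters data (gH data) (gW data)) (gH data) (gW data) fuel
              (rest ++ new) (e ++ new) s'
            = (E.countP (fun p => decide (isSpl data p)) : Int) := by
        intro new s' hs' hndnew hfresh hnewall hsucc hlen2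
        have hnd' : (e ++ new).Nodup :=
          List.Nodup.append hnd hndnew (fun x hx hx' => hfresh x hx' hx)
        have hall' : ∀ x ∈ e ++ new, RC data x ∧ inB data x := by
          intro x hx
          rcases List.mem_append.1 hx with hx' | hx'
          · exact hall x hx'
          · exact hnewall x hx'
        have hsub' : ∀ x ∈ e, x ∈ e ++ new := fun x hx => List.mem_append_left _ hx
        have hdone' : ∀ x ∈ done ++ [cur], SuccsIn data x (e ++ new) := by
          intro x hx
          rcases List.mem_append.1 hx with hx' | hx'
          · exact SuccsIn_mono data hsub' (hdone x hx')
          · simp at hx'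
            exact hx' ▸ hsucc
        have hcap' : (e ++ new).length ≤ (cellList data).length := by
          have hsubE' : ∀ x ∈ e ++ new, x ∈ cellList data :=
            fun x hx => (mem_cellList data x).2 (hall' x hx).2
          exact ((hnd'.subperm hsubE')).length_le
        have he' : e ++ new = (done ++ [cur]) ++ (rest ++ new) := by
          rw [he]
          simp [List.append_assoc]
        have hm' : (rest ++ new).length + 2 * ((cellList data).length - (e ++ new).length)
            < fuel := by
          have h1 : e.length = done.length + (rest.length + 1) := by
            rw [he]; simp
          simp only [List.length_append] at hcap' ⊢
          simp only [List.length_cons] at hm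
          omega
        exact ih (rest ++ new) (done ++ [cur]) (e ++ new) s' he' hs' hnd' hall' hdone'
          (List.mem_append_left _ hstart) hm'
      simp only [solveLoop]
      by_cases hspl : isSpl data cur
      · rw [if_pos ((mem_spl data cur).2 hspl)]
        have hs1 : s + 1 = ((done ++ [cur]).countP (fun p => decide (isSpl data p)) : Int) := by
          rw [List.countP_append, hs]
          simp [hspl]
        have hcol0 : 0 ≤ cur.2 := hspl.2.2.1
        simp only [List.foldl_cons, List.foldl_nil]
        by_cases h1 : (cur.1, cur.2 + -1) ∈ e
        · have hc1 : ¬(cur.1 < gH data ∧ cur.2 + -1 < gW data ∧ (cur.1, cur.2 + -1) ∉ e) :=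
            fun hc => hc.2.2 h1
          rw [if_neg hc1]
          by_cases h2w : cur.2 + 1 < gW data
          · by_cases h2 : (cur.1, cur.2 + 1) ∈ e
            · have hc2 : ¬(cur.1 < gH data ∧ cur.2 + 1 < gW data ∧ (cur.1, cur.2 + 1) ∉ e) :=
                fun hc => hc.2.2 h2
              rw [if_neg hc2]
              have := key [] (s + 1) hs1 (by simp) (by simp) (by simp)
                ⟨fun _ d hd hw => by
                  rcases hd with rfl | rfl
                  · simpa using h1
                  · simpa using h2, fun h => absurd hspl h⟩ (by simp)
              simpa using this
            · have hc2 : cur.1 < gH data ∧ cur.2 + 1 < gW data ∧ (cur.1, cur.2 + 1) ∉ e :=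
                ⟨hb2, h2w, h2⟩
              rw [if_pos hc2, PySem.Set.add_of_not_mem h2]
              exact key [(cur.1, cur.2 + 1)] (s + 1) hs1 (by simp)
                (by simpa using h2)
                (by
                  intro x hx
                  simp at hx
                  subst hx
                  exact ⟨RC.side hcurRC hspl (Or.inr rfl) h2w, hb1, hb2, by omega, h2w⟩)
                ⟨fun _ d hd hw => by
                  rcases hd with rfl | rfl
                  · exact List.mem_append_left _ h1
                  · simp, fun h => absurd hspl h⟩ (by simp)
          · have hc2 : ¬(cur.1 < gH data ∧ cur.2 + 1 < gW data ∧ (cur.1, cur.2 + 1) ∉ e) :=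
              fun hc => h2w hc.2.1
            rw [if_neg hc2]
            have := key [] (s + 1) hs1 (by simp) (by simp) (by simp)
              ⟨fun _ d hd hw => by
                rcases hd with rfl | rfl
                · simpa using h1
                · exact absurd hw h2w, fun h => absurd hspl h⟩ (by simp)
            simpa using this
        · have hc1 : cur.1 < gH data ∧ cur.2 + -1 < gW data ∧ (cur.1, cur.2 + -1) ∉ e :=
            ⟨hb2, by omega, h1⟩
          rw [if_pos hc1, PySem.Set.add_of_not_mem h1]
          have ha1 : RC data (cur.1, cur.2 + -1) ∧ inB data (cur.1, cur.2 + -1) :=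
            ⟨RC.side hcurRC hspl (Or.inl rfl) (by omega), hb1, hb2, by omega, by omega⟩
          by_cases h2w : cur.2 + 1 < gW data
          · by_cases h2 : (cur.1, cur.2 + 1) ∈ e ++ [(cur.1, cur.2 + -1)]
            · have hc2 : ¬(cur.1 < gH data ∧ cur.2 + 1 < gW data ∧
                  (cur.1, cur.2 + 1) ∉ e ++ [(cur.1, cur.2 + -1)]) :=
                fun hc => hc.2.2 h2
              rw [if_neg hc2]
              exact key [(cur.1, cur.2 + -1)] (s + 1) hs1 (by simp) (by simpa using h1)
                (by
                  intro x hx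
                  simp at hx
                  subst hx
                  exact ha1)
                ⟨fun _ d hd hw => by
                  rcases hd with rfl | rfl
                  · simp
                  · exact h2, fun h => absurd hspl h⟩
                (by simp)
            · have hc2 : cur.1 < gH data ∧ cur.2 + 1 < gW data ∧
                  (cur.1, cur.2 + 1) ∉ e ++ [(cur.1, cur.2 + -1)] :=
                ⟨hb2, h2w, h2⟩
              rw [if_pos hc2, PySem.Set.add_of_not_mem h2]
              have hassoc : (e ++ [(cur.1, cur.2 + -1)]) ++ [(cur.1, cur.2 + 1)]
                  = e ++ [(cur.1, cur.2 + -1), (cur.1, cur.2 + 1)] := by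
                simp
              have hassoc2 : (rest ++ [(cur.1, cur.2 + -1)]) ++ [(cur.1, cur.2 + 1)]
                  = rest ++ [(cur.1, cur.2 + -1), (cur.1, cur.2 + 1)] := by
                simp
              rw [hassoc, hassoc2]
              simp only [List.mem_append] at h2
              push_neg at h2
              exact key [(cur.1, cur.2 + -1), (cur.1, cur.2 + 1)] (s + 1) hs1
                (by
                  refine List.nodup_cons.2 ⟨?_, List.nodup_singleton _⟩
                  intro hcontra
                  rw [List.mem_singleton] at hcontra
                  have hsnd := congrArg Prod.snd hcontra
                  simp at hsnd)
                (by
                  intro x hx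
                  rcases List.mem_cons.1 hx with rfl | hx'
                  · exact h1
                  · simp at hx'
                    subst hx'
                    exact h2.1)
                (by
                  intro x hx
                  rcases List.mem_cons.1 hx with rfl | hx'
                  · exact ha1
                  · simp at hx'
                    subst hx'
                    exact ⟨RC.side hcurRC hspl (Or.inr rfl) h2w, hb1, hb2, by omega, h2w⟩)
                ⟨fun _ d hd hw => by
                  rcases hd with rfl | rfl
                  · simp
                  · simp, fun h => absurd hspl h⟩ (by simp)
          · have hc2 : ¬(cur.1 < gH data ∧ cur.2 + 1 < gW data ∧
                (cur.1, cur.2 + 1) ∉ e ++ [(cur.1, cur.2 + -1)]) :=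
              fun hc => h2w hc.2.1
            rw [if_neg hc2]
            exact key [(cur.1, cur.2 + -1)] (s + 1) hs1 (by simp) (by simpa using h1)
              (by
                intro x hx
                simp at hx
                subst hx
                exact ha1)
              ⟨fun _ d hd hw => by
                rcases hd with rfl | rfl
                · simp
                · exact absurd hw h2w, fun h => absurd hspl h⟩ (by simp)
      · rw [if_neg (fun hmem => hspl ((mem_spl data cur).1 hmem))]
        have hs0 : s = ((done ++ [cur]).countP (fun p => decide (isSpl data p)) : Int) := by
          rw [List.countP_append, hs]
          simp [hspl]
        by_cases hg : (cur.1 + 1, cur.2) ∈ e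
        · have hc : ¬(cur.1 + 1 < gH data ∧ cur.2 < gW data ∧ (cur.1 + 1, cur.2) ∉ e) :=
            fun hc => hc.2.2 hg
          rw [if_neg hc]
          have := key [] s hs0 (by simp) (by simp) (by simp)
            ⟨fun h => absurd h hspl, fun _ hh hw => by simpa using hg⟩ (by simp)
          simpa using this
        · by_cases hrow : cur.1 + 1 < gH data
          · have hc : cur.1 + 1 < gH data ∧ cur.2 < gW data ∧ (cur.1 + 1, cur.2) ∉ e :=
              ⟨hrow, hb4, hg⟩
            rw [if_pos hc, PySem.Set.add_of_not_mem hg]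
            exact key [(cur.1 + 1, cur.2)] s hs0 (by simp) (by simpa using hg)
              (by
                intro x hx
                simp at hx
                subst hx
                exact ⟨RC.down hcurRC hspl hrow hb4, by omega, hrow, hb3, hb4⟩)
              ⟨fun h => absurd h hspl, fun _ hh hw => by simp⟩ (by simp)
          · have hc : ¬(cur.1 + 1 < gH data ∧ cur.2 < gW data ∧ (cur.1 + 1, cur.2) ∉ e) :=
              fun hc => hrow hc.1
            rw [if_neg hc]
            have := key [] s hs0 (by simp) (by simp) (by simp)
              ⟨fun h => absurd h hspl, fun _ hh hw => absurd hh hrow⟩ (by simp)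
            simpa using this

theorem gS_bounds (data : List String) : -1 ≤ gS data ∧ gS data < gW data := by
  unfold gS gW
  rw [PySem.Str.find_eq]
  constructor
  · exact PySem.Chars.neg_one_le_find _ _
  · rcases lt_or_ge (PySem.Chars.find (PySem.List.pyGetD data 0 "").toList "S".toList) 0 with h | h
    · have := PySem.Chars.neg_one_le_find (PySem.List.pyGetD data 0 "").toList "S".toList
      have hlen : (0 : Int) ≤ ((PySem.List.pyGetD data 0 "").toList.length : Int) := by positivity
      omega
    · obtain ⟨hpre, -⟩ := PySem.Chars.find_spec h
      have hle := hpre.length_le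
      rw [List.length_drop] at hle
      have hS : ("S".toList).length = 1 := rfl
      omega

theorem cellList_length (data : List String) :
    (cellList data).length = (gH data).toNat * ((gW data).toNat + 1) := by
  unfold cellList
  rw [List.length_flatMap]
  have hW : (0 : Int) ≤ gW data := by unfold gW; positivity
  have heach : ∀ i : Int, ((PySem.List.pyRange (-1) (gW data) 1).map (fun j => (i, j))).length
      = (gW data).toNat + 1 := by
    intro i
    rw [List.length_map, PySem.List.length_pyRange_one]
    omega
  calc ((PySem.List.pyRange 0 (gH data) 1).map _).sum
      = ((PySem.List.pyRange 0 (gH data) 1).map (fun _ => (gW data).toNat + 1)).sum := by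
        congr 1
        exact List.map_congr_left (fun i _ => heach i)
    _ = (PySem.List.pyRange 0 (gH data) 1).length * ((gW data).toNat + 1) := by
        rw [List.map_const', List.sum_replicate, smul_eq_mul]
    _ = (gH data).toNat * ((gW data).toNat + 1) := by
        rw [PySem.List.length_pyRange_one]
        norm_num

theorem A_run (data : List String) (hne : data ≠ []) :
    ∃ E : List (Int × Int), E.Nodup ∧ (∀ p, p ∈ E ↔ RC data p) ∧
      solve data = (E.countP (fun p => decide (isSpl data p)) : Int) := by
  have hH : 0 < gH data := by
    unfold gH
    simpa using List.length_pos_iff.2 hne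
  obtain ⟨hgs1, hgs2⟩ := gS_bounds data
  have hstartB : inB data (0, gS data) := ⟨le_refl 0, hH, hgs1, hgs2⟩
  have hm : ([(0, gS data)] : List (Int × Int)).length +
      2 * ((cellList data).length - ([(0, gS data)] : List (Int × Int)).length)
      < 2 * ((data.length : Int).toNat *
        (((PySem.List.pyGetD data 0 "").toList.length : Int).toNat + 1)) + 2 := by
    have hcl : (cellList data).length = (data.length : Int).toNat *
        (((PySem.List.pyGetD data 0 "").toList.length : Int).toNat + 1) := by
      rw [cellList_length data]
      rfl
    simp only [List.length_cons, List.length_nil]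
    omega
  obtain ⟨E, h1, h2, h3, h4, h5⟩ := A_loop data
    (2 * ((data.length : Int).toNat *
      (((PySem.List.pyGetD data 0 "").toList.length : Int).toNat + 1)) + 2)
    [(0, gS data)] [] [(0, gS data)] 0
    (by simp) (by simp) (by simp)
    (by
      intro x hx
      simp at hx
      subst hx
      exact ⟨RC.start, hstartB⟩)
    (by simp)
    (by simp)
    hm
  refine ⟨E, h1, ?_, h5⟩
  intro p
  constructor
  · exact fun hp => (h2 p hp).1
  · intro hp
    induction hp with
    | start => exact h4
    | @down r c hrc hnspl hrow hcol ihp =>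
      exact (h3 (r, c) ihp).2 hnspl hrow hcol
    | @side r c d hrc hsplc hd hcol ihp =>
      exact (h3 (r, c) ihp).1 hsplc d hd hcol

-- ===== VERDICT (by name: the statement is the Claim_ definition above) =====
theorem solve_spec : Claim_equal_solve := by
  intro data _ hpre
  unfold Spec_solve
  obtain ⟨E, hEnd, hEmem, hEval⟩ := A_run data hpre.1
  obtain ⟨V, hVnd, hVmem, hVval⟩ := B_run data
  rw [hEval, hVval]
  have hperm : (E.filter (fun p => decide (isSpl data p))).Perm V := by
    apply (List.perm_ext_iff_of_nodup (hEnd.filter _) hVnd).2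
    intro p
    simp only [List.mem_filter, hEmem p, hVmem p, decide_eq_true_eq]
    exact bridge data p
  rw [List.countP_eq_length_filter, hperm.length_eq]
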